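-- pv_equiv track=rewrite | github.com/ylsama/leetcode | 79.py | findEachCharPath
-- ===== SOURCE A (Python) =====
-- def findEachCharPath(board, charArray):
--     foundedCharPath = {}
--     isAllCharFound = True
--
--     for rowID in range(len(board)):
--         for columnID in range(len(board[0])):
--             char = board[rowID][columnID]
--             if char not in charArray:
--                 continue
--             if char not in foundedCharPath:
--                 foundedCharPath[char] = []
--
--             charPath = [(rowID, columnID)]
--             foundedCharPath[char].append(charPath)
--
--     for char in charArray:
--         if char not in foundedCharPath:
--             isAllCharFound = False
--             break
--
--     return foundedCharPath, isAllCharFound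
-- ===== SOURCE B (Python) =====
-- def findEachCharPath(board, charArray):
--     ncols = 0 if not board else len(board[0])
--     cells = [(r, c, board[r][c]) for r in range(len(board)) for c in range(ncols)]
--     targets = set(charArray)
--     seen = []
--     for _, _, ch in cells:
--         if ch in targets and ch not in seen:
--             seen.append(ch)
--     found = {ch: [[(r, c)] for r, c, ch2 in cells if ch2 == ch] for ch in seen}
--     ok = all(ch in seen for ch in charArray)
--     return found, ok
-- ===== Notes on version B (the rewrite author's own statement) =====
-- stated objective: alternative
-- what changed: A builds the per-character position dict incrementally with membership tests and key-existence checks inside the board scan; B first materialises the scanned cells, takes the key order as an ordered dedup of cells matching set(charArray), and builds each key's path list with one filter over the cells.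
import Mathlib
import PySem

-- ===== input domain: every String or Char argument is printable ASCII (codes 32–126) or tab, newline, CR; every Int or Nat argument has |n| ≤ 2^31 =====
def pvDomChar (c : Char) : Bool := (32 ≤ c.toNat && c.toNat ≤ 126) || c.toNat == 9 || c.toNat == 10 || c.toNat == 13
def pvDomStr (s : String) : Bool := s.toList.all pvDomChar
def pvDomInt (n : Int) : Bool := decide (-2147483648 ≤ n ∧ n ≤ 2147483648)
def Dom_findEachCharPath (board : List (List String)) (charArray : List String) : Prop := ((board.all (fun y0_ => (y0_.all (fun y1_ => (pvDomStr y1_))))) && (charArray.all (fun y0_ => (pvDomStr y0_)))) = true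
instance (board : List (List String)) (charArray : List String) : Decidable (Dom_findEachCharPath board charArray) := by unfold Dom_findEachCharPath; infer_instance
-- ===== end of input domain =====

-- B replaces A's incremental dict-building pass with a per-character grouping: a cell
-- comprehension, an ordered dedup for the key order, and one filter per key (objective: alternative).

-- ===== PORT A =====
-- A's second loop: 'for char in charArray: if char not in dict: isAllCharFound = False; break'
def pvCheckA (d : PySem.Dict String (List (List (Int × Int)))) : List String → Bool
  | [] => true
  | c :: rest => if d.contains c = false then false else pvCheckA d rest

def findEachCharPath (board : List (List String)) (charArray : List String) :
    (List (String × List (List (Int × Int)))) × Bool :=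
  let found :=
    (PySem.List.pyRange 0 board.length 1).foldl (fun d rowID =>
      (PySem.List.pyRange 0 ((PySem.List.pyGetD board 0 []).length : Int) 1).foldl (fun d columnID =>
        let char := PySem.List.pyGetD (PySem.List.pyGetD board rowID []) columnID ""
        if charArray.contains char = false then d
        else
          let d := if d.contains char then d else d.insert char []
          d.modify char [] (fun l => l ++ [[(rowID, columnID)]])) d)
      PySem.Dict.empty
  let isAllCharFound := pvCheckA found charArray
  (found.items, isAllCharFound)

-- ===== PORT B =====
def findEachCharPath_alt (board : List (List String)) (charArray : List String) :
    (List (String × List (List (Int × Int)))) × Bool :=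
  let ncols : Int := if board.isEmpty then 0 else ((board.headD []).length : Int)
  let cells : List (Int × Int × String) :=
    (PySem.List.pyRange 0 board.length 1).flatMap (fun r =>
      (PySem.List.pyRange 0 ncols 1).map (fun c =>
        (r, c, PySem.List.pyGetD (PySem.List.pyGetD board r []) c "")))
  let targets : PySem.Set String := PySem.Set.ofList charArray
  let seen : List String :=
    cells.foldl (fun s t =>
      if targets.contains t.2.2 && !(s.contains t.2.2) then s ++ [t.2.2] else s) []
  let found := seen.map (fun ch =>
    (ch, (cells.filter (fun t => t.2.2 == ch)).map (fun t => ([(t.1, t.2.1)] : List (Int × Int)))))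
  (found, charArray.all (fun ch => seen.contains ch))

-- ===== PRECONDITION & SPEC =====
-- Pre_ excludes ragged boards whose first row is longer than some later row: there the
-- Python A raises IndexError while indexing board[rowID][columnID] (B raises identically).
def Pre_findEachCharPath (board : List (List String)) (_charArray : List String) : Prop :=
  ∀ row ∈ board, (board.headD []).length ≤ row.length
instance (board : List (List String)) (charArray : List String) : Decidable (Pre_findEachCharPath board charArray) := by unfold Pre_findEachCharPath; infer_instance
def pvWitness_findEachCharPath : List (List String) × List String :=
  ([["a", "b"], ["b", "a"]], ["b", "z"])
def Spec_findEachCharPath (board : List (List String)) (charArray : List String) (out : (List (String × List (List (Int × Int)))) × Bool) : Prop := out = findEachCharPath_alt board charArray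
instance (board : List (List String)) (charArray : List String) (out : (List (String × List (List (Int × Int)))) × Bool) : Decidable (Spec_findEachCharPath board charArray out) := by unfold Spec_findEachCharPath; infer_instance

-- ===== CLAIM (what is proved, stated in full; the proofs are below) =====
def Claim_equal_findEachCharPath : Prop := ∀ (board : List (List String)) (charArray : List String), Dom_findEachCharPath board charArray → Pre_findEachCharPath board charArray → Spec_findEachCharPath board charArray (findEachCharPath board charArray)

-- ===== LEMMAS AND PROOFS =====

-- the scanned cells (row-major, first row's width), shared shape of both loop nests
def pvCellsA (board : List (List String)) : List (Int × Int × String) :=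
  (PySem.List.pyRange 0 board.length 1).flatMap (fun r =>
    (PySem.List.pyRange 0 ((PySem.List.pyGetD board 0 []).length : Int) 1).map (fun c =>
      (r, c, PySem.List.pyGetD (PySem.List.pyGetD board r []) c "")))

-- abstract per-cell step of A's nested loops
def pvStepA (charArray : List String) (d : PySem.Dict String (List (List (Int × Int))))
    (t : Int × Int × String) : PySem.Dict String (List (List (Int × Int))) :=
  if charArray.contains t.2.2 = false then d
  else
    let d := if d.contains t.2.2 then d else d.insert t.2.2 []
    d.modify t.2.2 [] (fun l => l ++ [[(t.1, t.2.1)]])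

def pvSeen (charArray : List String) (cells : List (Int × Int × String)) : List String :=
  cells.foldl (fun s t =>
    if charArray.contains t.2.2 && !(s.contains t.2.2) then s ++ [t.2.2] else s) []

def pvPaths (cells : List (Int × Int × String)) (ch : String) : List (List (Int × Int)) :=
  (cells.filter (fun t => t.2.2 == ch)).map (fun t => ([(t.1, t.2.1)] : List (Int × Int)))

lemma pvSeen_append (charArray : List String) (cells : List (Int × Int × String)) (x : Int × Int × String) :
    pvSeen charArray (cells ++ [x]) =
      if charArray.contains x.2.2 && !((pvSeen charArray cells).contains x.2.2)
      then pvSeen charArray cells ++ [x.2.2] else pvSeen charArray cells := by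
  simp [pvSeen, List.foldl_append]

lemma pvSeen_mem_aux (charArray : List String) :
    ∀ (cells : List (Int × Int × String)) (s : List String) (k : String),
      (k ∈ cells.foldl (fun s t =>
          if charArray.contains t.2.2 && !(s.contains t.2.2) then s ++ [t.2.2] else s) s
        ↔ k ∈ s ∨ (charArray.contains k = true ∧ ∃ t ∈ cells, t.2.2 = k)) := by
  intro cells
  induction cells with
  | nil => intro s k; simp
  | cons t cells ih =>
    intro s k
    simp only [List.foldl_cons]
    rw [ih]
    rcases Bool.eq_false_or_eq_true (charArray.contains t.2.2) with h1 | h1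
    case inr =>
      -- t's char not a target: the accumulator is unchanged
      have hcond : (charArray.contains t.2.2 && !(s.contains t.2.2)) = false := by
        rw [h1]; simp
      simp only [hcond, Bool.false_eq_true, if_false]
      constructor
      · rintro (h | ⟨hca, u, hu, he⟩)
        · exact Or.inl h
        · exact Or.inr ⟨hca, u, List.mem_cons_of_mem _ hu, he⟩
      · rintro (h | ⟨hca, u, hu, he⟩)
        · exact Or.inl h
        · rcases List.mem_cons.mp hu with rfl | hu'
          · rw [he] at h1; rw [h1] at hca; exact absurd hca (by simp)
          · exact Or.inr ⟨hca, u, hu', he⟩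
    case inl =>
      rcases Bool.eq_false_or_eq_true (s.contains t.2.2) with h2 | h2
      case inr =>
        -- new target char: appended
        have hcond : (charArray.contains t.2.2 && !(s.contains t.2.2)) = true := by
          rw [h1, h2]; simp
        simp only [hcond, if_true]
        constructor
        · rintro (h | ⟨hca, u, hu, he⟩)
          · rcases List.mem_append.mp h with h' | h'
            · exact Or.inl h'
            · have hk : k = t.2.2 := by simpa using h'
              exact Or.inr ⟨hk ▸ h1, t, List.mem_cons_self, hk.symm⟩
          · exact Or.inr ⟨hca, u, List.mem_cons_of_mem _ hu, he⟩
        · rintro (h | ⟨hca, u, hu, he⟩)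
          · exact Or.inl (List.mem_append_left _ h)
          · rcases List.mem_cons.mp hu with rfl | hu'
            · exact Or.inl (List.mem_append_right _ (by simp [he]))
            · exact Or.inr ⟨hca, u, hu', he⟩
      case inl =>
        -- target char already recorded: unchanged
        have hcond : (charArray.contains t.2.2 && !(s.contains t.2.2)) = false := by
          rw [h2]; simp
        simp only [hcond, Bool.false_eq_true, if_false]
        constructor
        · rintro (h | ⟨hca, u, hu, he⟩)
          · exact Or.inl h
          · exact Or.inr ⟨hca, u, List.mem_cons_of_mem _ hu, he⟩
        · rintro (h | ⟨hca, u, hu, he⟩)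
          · exact Or.inl h
          · rcases List.mem_cons.mp hu with rfl | hu'
            · exact Or.inl (he ▸ List.contains_iff_mem.mp h2)
            · exact Or.inr ⟨hca, u, hu', he⟩

lemma pvSeen_mem (charArray : List String) (cells : List (Int × Int × String)) (k : String) :
    k ∈ pvSeen charArray cells ↔ charArray.contains k = true ∧ ∃ t ∈ cells, t.2.2 = k := by
  rw [pvSeen, pvSeen_mem_aux]; simp

lemma pvSeen_sub (charArray : List String) (cells : List (Int × Int × String)) :
    ∀ k ∈ pvSeen charArray cells, charArray.contains k = true :=
  fun k hk => ((pvSeen_mem charArray cells k).mp hk).1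

lemma pvSeen_nodup_aux (charArray : List String) :
    ∀ (cells : List (Int × Int × String)) (s : List String), s.Nodup →
      (cells.foldl (fun s t =>
        if charArray.contains t.2.2 && !(s.contains t.2.2) then s ++ [t.2.2] else s) s).Nodup := by
  intro cells
  induction cells with
  | nil => intro s hs; simpa
  | cons t cells ih =>
    intro s hs
    simp only [List.foldl_cons]
    by_cases h : charArray.contains t.2.2 && !(s.contains t.2.2)
    · rw [if_pos h]
      refine ih _ ?_
      have hns : t.2.2 ∉ s := by
        have hb := (Bool.and_eq_true ..).mp h
        simpa using hb.2
      exact List.Nodup.append hs (List.nodup_singleton _) (List.disjoint_singleton.mpr hns)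
    · rw [if_neg h]; exact ih _ hs

lemma pvSeen_nodup (charArray : List String) (cells : List (Int × Int × String)) :
    (pvSeen charArray cells).Nodup :=
  pvSeen_nodup_aux charArray cells [] List.nodup_nil

lemma pvPaths_append (cells : List (Int × Int × String)) (x : Int × Int × String) (ch : String) :
    pvPaths (cells ++ [x]) ch =
      pvPaths cells ch ++ (if x.2.2 = ch then [[(x.1, x.2.1)]] else []) := by
  by_cases h : x.2.2 = ch
  · simp [pvPaths, List.filter_append, h]
  · simp [pvPaths, List.filter_append, h]

lemma pvPaths_nil_of_not_seen (charArray : List String) (cells : List (Int × Int × String))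
    (ch : String) (hca : charArray.contains ch = true) (h : ch ∉ pvSeen charArray cells) :
    pvPaths cells ch = [] := by
  rw [pvPaths, List.map_eq_nil_iff, List.filter_eq_nil_iff]
  intro t ht
  simp only [beq_iff_eq]
  intro he
  exact h ((pvSeen_mem charArray cells ch).mpr ⟨hca, t, ht, he⟩)

-- loop invariant of A's first pass: keys are the ordered dedup, the stored value is the filter
lemma pvFold_inv (charArray : List String) (cells : List (Int × Int × String)) :
    (cells.foldl (pvStepA charArray) PySem.Dict.empty).keys = pvSeen charArray cells ∧
    ∀ k ∈ pvSeen charArray cells,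
      (cells.foldl (pvStepA charArray) PySem.Dict.empty).getD k [] = pvPaths cells k := by
  induction cells using List.reverseRecOn with
  | nil => simp [pvSeen, PySem.Dict.keys_empty]
  | append_singleton cs x ih =>
    obtain ⟨hk, hg⟩ := ih
    rw [List.foldl_append]
    set d := cs.foldl (pvStepA charArray) PySem.Dict.empty with hd
    simp only [List.foldl_cons, List.foldl_nil]
    rw [pvSeen_append]
    by_cases hca : charArray.contains x.2.2 = true
    · by_cases hmem : x.2.2 ∈ pvSeen charArray cs
      · -- already a key: modify appends, keys unchanged
        have hcond : (charArray.contains x.2.2 && !((pvSeen charArray cs).contains x.2.2)) = false := by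
          simp [hmem]
        rw [hcond, if_neg (by simp)]
        have hcont : d.contains x.2.2 = true := by
          rw [PySem.Dict.contains_iff_mem_keys, hk]; exact hmem
        have hstep : pvStepA charArray d x = d.modify x.2.2 [] (fun l => l ++ [[(x.1, x.2.1)]]) := by
          simp [pvStepA, hcont, List.contains_iff_mem.mp hca]
        rw [hstep]
        constructor
        · rw [PySem.Dict.keys_modify, PySem.Dict.keys_insert_of_contains _ _ hcont, hk]
        · intro k hkm
          simp only [PySem.Dict.getD_modify]
          by_cases hke : k = x.2.2
          · rw [if_pos hke, hg x.2.2 (hke ▸ hkm), pvPaths_append, if_pos hke.symm, hke]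
          · rw [if_neg hke, hg k hkm, pvPaths_append, if_neg (fun h => hke h.symm),
                List.append_nil]
      · -- new key: insert then modify, appended at the end
        have hcond : (charArray.contains x.2.2 && !((pvSeen charArray cs).contains x.2.2)) = true := by
          simp [hmem, List.contains_iff_mem.mp hca]
        rw [hcond, if_pos rfl]
        have hcont : d.contains x.2.2 = false := by
          rw [Bool.eq_false_iff]
          intro h
          exact hmem (hk ▸ (PySem.Dict.contains_iff_mem_keys d x.2.2).mp h)
        have hstep : pvStepA charArray d x =
            (d.insert x.2.2 []).modify x.2.2 [] (fun l => l ++ [[(x.1, x.2.1)]]) := by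
          simp [pvStepA, hcont, List.contains_iff_mem.mp hca]
        rw [hstep]
        constructor
        · rw [PySem.Dict.keys_modify,
              PySem.Dict.keys_insert_of_contains _ _ (PySem.Dict.contains_insert_self d x.2.2 []),
              PySem.Dict.keys_insert_of_not_contains _ _ hcont, hk]
        · intro k hkm
          simp only [PySem.Dict.getD_modify]
          by_cases hke : k = x.2.2
          · rw [if_pos hke, PySem.Dict.getD_insert_self, pvPaths_append, if_pos hke.symm, hke,
                pvPaths_nil_of_not_seen charArray cs x.2.2 hca hmem]
          · have hkm' : k ∈ pvSeen charArray cs := by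
              rcases List.mem_append.mp hkm with h | h
              · exact h
              · exact absurd (by simpa using h) hke
            rw [if_neg hke, PySem.Dict.getD_insert_of_ne _ _ _ hke, hg k hkm',
                pvPaths_append, if_neg (fun h => hke h.symm), List.append_nil]
    · -- char not in charArray: everything unchanged
      have hca' : charArray.contains x.2.2 = false := by simpa using hca
      rw [hca']
      simp only [Bool.false_and, if_neg (by simp : ¬ (false = true))]
      have hstep : pvStepA charArray d x = d := by
        have hnm : x.2.2 ∉ charArray := by simpa using hca'
        simp [pvStepA, hnm]
      rw [hstep]
      refine ⟨hk, fun k hkm => ?_⟩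
      have hne : x.2.2 ≠ k := by
        intro h
        have hc := pvSeen_sub charArray cs k hkm
        rw [← h, hca'] at hc
        exact absurd hc (by simp)
      rw [hg k hkm, pvPaths_append, if_neg hne, List.append_nil]

lemma pvCheckA_all (d : PySem.Dict String (List (List (Int × Int)))) (l : List String) :
    pvCheckA d l = l.all (fun c => d.contains c) := by
  induction l with
  | nil => rfl
  | cons c rest ih => by_cases h : d.contains c = false <;> simp [pvCheckA, h, ih]

lemma pv_ncols_eq (board : List (List String)) :
    (if board.isEmpty then 0 else ((board.headD []).length : Int)) =
      ((PySem.List.pyGetD board 0 []).length : Int) := by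
  cases board <;> simp [PySem.List.pyGetD, PySem.List.pyGet?, PySem.List.pyIdx?]

lemma portA_eq (board : List (List String)) (charArray : List String) :
    findEachCharPath board charArray =
      (((pvCellsA board).foldl (pvStepA charArray) PySem.Dict.empty).items,
        pvCheckA ((pvCellsA board).foldl (pvStepA charArray) PySem.Dict.empty) charArray) := by
  unfold findEachCharPath pvCellsA
  simp only [List.foldl_flatMap, List.foldl_map]
  rfl

lemma portB_eq (board : List (List String)) (charArray : List String) :
    findEachCharPath_alt board charArray =
      ((pvSeen charArray (pvCellsA board)).map
          (fun ch => (ch, pvPaths (pvCellsA board) ch)),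
        charArray.all (fun ch => (pvSeen charArray (pvCellsA board)).contains ch)) := by
  unfold findEachCharPath_alt pvCellsA pvSeen pvPaths
  have hmo : ∀ x : String, (PySem.Set.ofList charArray).contains x = charArray.contains x := by
    intro x
    simp only [PySem.Set.contains_eq_listContains, List.contains_eq_mem, PySem.Set.mem_ofList]
  rw [pv_ncols_eq]
  simp only [hmo]

-- ===== VERDICT (by name: the statement is the Claim_ definition above) =====
theorem findEachCharPath_spec : Claim_equal_findEachCharPath := by
  intro board charArray _ _
  unfold Spec_findEachCharPath
  rw [portA_eq, portB_eq]
  obtain ⟨hk, hg⟩ := pvFold_inv charArray (pvCellsA board)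
  set d := (pvCellsA board).foldl (pvStepA charArray) PySem.Dict.empty with hd
  have hnd : d.keys.Nodup := hk ▸ pvSeen_nodup charArray (pvCellsA board)
  refine Prod.ext ?_ ?_
  · rw [PySem.Dict.items_eq_map_keys d hnd [], hk]
    exact List.map_congr_left fun k hkm => by rw [hg k hkm]
  · rw [pvCheckA_all]
    have hfun : (fun c => d.contains c) = (fun ch => (pvSeen charArray (pvCellsA board)).contains ch) := by
      funext c
      rw [PySem.Dict.contains_eq_decide_mem_keys, hk]
      simp
    rw [hfun]
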